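-- pv_equiv track=rewrite | github.com/naoyama88/wmad_python | 20190523problem12.py | find_the_number
-- ===== SOURCE A (Python) =====
-- def find_the_number(num_a, num_b):
--     """ find the positive number (and greater than 2),
--     (let’s call it T) which has the following characteristic:
--     • For all numbers which are less than T we have F1(x)< F2(x)
--     • For all numbers which are greater than or equal T we have F1(x)> F2(x)
--     :param num_a:
--     :param num_b:
--     :return:
--     """
--     x = 1
--     while True:
--         x += 1
--         f1 = square(num_a, x)
--         f2 = square(x, num_b)
--         if f1 >= f2:
--             return x
--
-- def square(a, b):
--     """ square 2 numbers
--     :param a: a number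
--     :param b: a number
--     :return: squared number
--     """
--     return a ** b
-- ===== SOURCE B (Python) =====
-- def find_the_number(num_a, num_b):
--     # exponential + binary search for the first x >= 2 with num_a**x >= x**num_b
--     a = abs(num_a)
--     step = 2 if num_a < 0 else 1   # a negative base can only win at even exponents
--     def ok(x):
--         return a ** x >= x ** num_b
--     if ok(2):
--         return 2
--     hi = 2 + step
--     while not ok(hi):
--         hi = 2 + (hi - 2) * 2
--     lo = 2
--     while hi - lo > step:
--         mid = lo + ((hi - lo) // (2 * step)) * step
--         if ok(mid):
--             hi = mid
--         else:
--             lo = mid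
--     return hi
-- ===== Notes on version B (the rewrite author's own statement) =====
-- stated objective: faster
-- what changed: A scans x = 2,3,4,... evaluating both big powers at every x until the first x with num_a**x >= x**num_b; B checks x=2, then doubles an offset (on the even grid when num_a < 0, since a negative base can only win at an even exponent) until the predicate holds and binary-searches the first true point, which is valid because for x >= 3 the predicate is monotone (x^(x+1) >= (x+1)^x).
-- outside the precondition, e.g. on find_the_number(0, -2000): A returns 2, B returns 2
import Mathlib
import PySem

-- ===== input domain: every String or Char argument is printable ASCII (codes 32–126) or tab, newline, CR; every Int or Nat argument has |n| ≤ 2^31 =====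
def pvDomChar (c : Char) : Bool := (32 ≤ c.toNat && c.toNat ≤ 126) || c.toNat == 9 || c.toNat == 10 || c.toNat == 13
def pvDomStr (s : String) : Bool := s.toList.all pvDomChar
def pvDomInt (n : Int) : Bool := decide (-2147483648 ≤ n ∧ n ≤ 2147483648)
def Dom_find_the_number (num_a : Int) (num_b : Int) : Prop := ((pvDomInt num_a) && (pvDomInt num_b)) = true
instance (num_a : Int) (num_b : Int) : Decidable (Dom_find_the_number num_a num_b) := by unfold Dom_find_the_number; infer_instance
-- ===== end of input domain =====

-- B replaces A's linear scan for the first x ≥ 2 with num_a**x ≥ x**num_b by an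
-- exponential-search-then-binary-search on the monotone tail of the predicate.
-- (Python's `a ** b` with b < 0 is a float; pyPow uses b.toNat — exact on every input
-- Pre_ admits, because for num_b < 0 both programs stop at x = 2 with the same value.)

-- ===== PORT A =====
-- Python `a ** b` (exact for 0 ≤ b; see header note for num_b < 0 under Pre_)
def pyPow (a b : Int) : Int := a ^ b.toNat

-- the `while True` loop of A, with a fuel bound proved sufficient under Pre_
def find_the_number_loop (num_a : Int) (num_b : Int) : Nat → Int → Int
  | 0, x => x
  | fuel + 1, x =>
    let x' := x + 1
    if pyPow num_a x' ≥ pyPow x' num_b then x'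
    else find_the_number_loop num_a num_b fuel x'

def find_the_number (num_a : Int) (num_b : Int) : Int :=
  find_the_number_loop num_a num_b (2 ^ (2 * num_b.toNat + 10)) 1

-- ===== PORT B =====
-- Python `a ** b` on B's side (same domain note as pyPow)
def altPow (a b : Int) : Int := a ^ b.toNat

-- Source B's ok(x): a ** x >= x ** num_b
def altOk (a num_b x : Int) : Bool := altPow a x ≥ altPow x num_b

-- Source B's doubling loop: hi = 2 + (hi - 2) * 2 until ok(hi)
def altExp (a num_b : Int) : Nat → Int → Int
  | 0, hi => hi
  | fuel + 1, hi =>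
    if altOk a num_b hi then hi else altExp a num_b fuel (2 + (hi - 2) * 2)

-- Source B's binary search: first grid point x with ok(x), given ¬ok(lo), ok(hi)
def altBin (a num_b step : Int) : Nat → Int → Int → Int
  | 0, _, hi => hi
  | fuel + 1, lo, hi =>
    if hi - lo ≤ step then hi
    else
      let mid := lo + (PySem.Int.floordiv (hi - lo) (2 * step)) * step
      if altOk a num_b mid then altBin a num_b step fuel lo mid
      else altBin a num_b step fuel mid hi

def find_the_number_alt (num_a : Int) (num_b : Int) : Int :=
  let a := if num_a < 0 then -num_a else num_a
  let step : Int := if num_a < 0 then 2 else 1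
  if altOk a num_b 2 then 2
  else
    let hi := altExp a num_b (2 * num_b.toNat + 9) (2 + step)
    altBin a num_b step (hi - 2).toNat 2 hi

-- ===== PRECONDITION & SPEC =====
-- Pre_ excludes exactly the inputs on which A does not return an int by its own
-- arithmetic: for 0 < num_b with |num_a| ≤ 1 and for num_a = 0 with -1074 ≤ num_b ≤ 0
-- the loop never terminates, and for num_a = 0 with num_b < -1074 A returns 2 only by
-- float underflow of 2.0 ** num_b, which the Int ports cannot reproduce.
def Pre_find_the_number (num_a : Int) (num_b : Int) : Prop :=
  (num_b ≤ 0 ∧ num_a ≠ 0) ∨ (0 < num_b ∧ (num_a ≤ -2 ∨ 2 ≤ num_a))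
instance (num_a : Int) (num_b : Int) : Decidable (Pre_find_the_number num_a num_b) := by
  unfold Pre_find_the_number; infer_instance

def pvWitness_find_the_number : Int × Int := (2, 3)

def Spec_find_the_number (num_a : Int) (num_b : Int) (out : Int) : Prop := out = find_the_number_alt num_a num_b
instance (num_a : Int) (num_b : Int) (out : Int) : Decidable (Spec_find_the_number num_a num_b out) := by unfold Spec_find_the_number; infer_instance

-- ===== CLAIM (what is proved, stated in full; the proofs are below) =====
def Claim_equal_find_the_number : Prop := ∀ (num_a : Int) (num_b : Int), Dom_find_the_number num_a num_b → Pre_find_the_number num_a num_b → Spec_find_the_number num_a num_b (find_the_number num_a num_b)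

-- ===== LEMMAS AND PROOFS =====

-- A's loop condition at the point y, as a Bool
def PI (num_a num_b y : Int) : Bool := pyPow num_a y ≥ pyPow y num_b

-- the Nat-side predicate both ports decide: n ^ B ≤ A ^ n
def QN (A B n : Nat) : Prop := n ^ B ≤ A ^ n

theorem pow_succ_ge (x : Nat) (hx : 3 ≤ x) : (x + 1) ^ x ≤ x ^ (x + 1) := by
  induction x, hx using Nat.le_induction with
  | base => decide
  | succ n hn ih =>
    have h1 : n * (n + 2) ≤ (n + 1) ^ 2 := by nlinarith
    have h2 : (n + 2) ^ (n + 1) * (n + 1) ^ n ≤ (n + 1) ^ (n + 2) * (n + 1) ^ n := by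
      calc (n + 2) ^ (n + 1) * (n + 1) ^ n
          ≤ (n + 2) ^ (n + 1) * n ^ (n + 1) := Nat.mul_le_mul_left _ ih
        _ = (n * (n + 2)) ^ (n + 1) := by rw [mul_pow]; ring
        _ ≤ ((n + 1) ^ 2) ^ (n + 1) := Nat.pow_le_pow_left h1 _
        _ = (n + 1) ^ (n + 2) * (n + 1) ^ n := by
            rw [← pow_mul, ← pow_add]; congr 1; ring
    exact Nat.le_of_mul_le_mul_right h2 (Nat.pow_pos (by omega))

theorem QN_step (A B x : Nat) (hx : 3 ≤ x) (h : x ^ B ≤ A ^ x) :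
    (x + 1) ^ B ≤ A ^ (x + 1) := by
  have e1 : ((x + 1) ^ B) ^ x ≤ (A * x ^ B) ^ x := by
    calc ((x + 1) ^ B) ^ x = ((x + 1) ^ x) ^ B := by rw [← pow_mul, ← pow_mul, mul_comm]
      _ ≤ (x ^ (x + 1)) ^ B := Nat.pow_le_pow_left (pow_succ_ge x hx) B
      _ = x ^ B * (x ^ B) ^ x := by rw [← pow_mul, ← pow_mul, ← pow_add]; congr 1; ring
      _ ≤ A ^ x * (x ^ B) ^ x := Nat.mul_le_mul_right _ h
      _ = (A * x ^ B) ^ x := (mul_pow _ _ _).symm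
  have e2 : (x + 1) ^ B ≤ A * x ^ B := by
    have := (Nat.pow_le_pow_iff_left (by omega : x ≠ 0)).mp e1
    exact this
  calc (x + 1) ^ B ≤ A * x ^ B := e2
    _ ≤ A * A ^ x := Nat.mul_le_mul_left _ h
    _ = A ^ (x + 1) := by ring

theorem QN_arith (B : Nat) : (2 * B + 10) * B ≤ 2 ^ (2 * B + 8) := by
  have hb : B < 2 ^ B := Nat.lt_two_pow_self
  have h2 : 2 ^ (2 * B + 8) = 256 * (2 ^ B * 2 ^ B) := by
    rw [pow_add, two_mul, pow_add]; ring
  nlinarith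


theorem QN_mono (A B : Nat) (x y : Nat) (hx : 3 ≤ x) (hxy : x ≤ y)
    (h : QN A B x) : QN A B y := by
  induction y, hxy using Nat.le_induction with
  | base => exact h
  | succ n hn ih => exact QN_step A B n (by omega) ih

theorem QN_big (A B x : Nat) (hA : 2 ≤ A) (h1 : 2 ^ (2 * B + 8) ≤ x) (h2 : x ≤ 2 ^ (2 * B + 10)) :
    QN A B x := by
  unfold QN
  calc x ^ B ≤ (2 ^ (2 * B + 10)) ^ B := Nat.pow_le_pow_left h2 _
    _ = 2 ^ ((2 * B + 10) * B) := by rw [← pow_mul]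
    _ ≤ 2 ^ x := Nat.pow_le_pow_right (by omega) (le_trans (QN_arith B) h1)
    _ ≤ A ^ x := Nat.pow_le_pow_left hA _

theorem QN_zero (A : Nat) (hA : 1 ≤ A) (n : Nat) : QN A 0 n := by
  simpa [QN] using Nat.one_le_pow _ _ (by omega)

theorem altOk_iff (A : Nat) (num_b : Int) (n : Nat) :
    (altOk (A : Int) num_b (n : Int) = true) ↔ QN A num_b.toNat n := by
  simp only [altOk, altPow, Int.toNat_natCast, QN, ge_iff_le, decide_eq_true_eq]
  constructor
  · intro h; exact_mod_cast h
  · intro h; exact_mod_cast h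

theorem PI_iff_nonneg (num_a num_b : Int) (h : 0 ≤ num_a) (n : Nat) :
    (PI num_a num_b (n : Int) = true) ↔ QN num_a.natAbs num_b.toNat n := by
  have ha : num_a = (num_a.natAbs : Int) := by omega
  rw [PI, ha]
  simp only [pyPow, Int.toNat_natCast, QN, ge_iff_le, decide_eq_true_eq]
  constructor
  · intro h; exact_mod_cast h
  · intro h; exact_mod_cast h

theorem PI_iff_neg_even (num_a num_b : Int) (h : num_a < 0) (n : Nat) (he : 2 ∣ n) :
    (PI num_a num_b (n : Int) = true) ↔ QN num_a.natAbs num_b.toNat n := by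
  have ha : num_a = -(num_a.natAbs : Int) := by omega
  have hev : Even n := even_iff_two_dvd.mpr he
  have hpow : num_a ^ n = ((num_a.natAbs : Int)) ^ n := by
    conv_lhs => rw [ha]
    exact hev.neg_pow _
  rw [PI]
  simp only [pyPow, Int.toNat_natCast, hpow, QN, ge_iff_le, decide_eq_true_eq]
  constructor
  · intro h; exact_mod_cast h
  · intro h; exact_mod_cast h

theorem PI_not_neg_odd (num_a num_b : Int) (h : num_a < 0) (n : Nat) (ho : ¬ 2 ∣ n) :
    ¬ PI num_a num_b (n : Int) = true := by
  have hodd : Odd n := Nat.odd_iff.mpr (by omega)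
  intro hp
  rw [PI] at hp
  simp only [pyPow, Int.toNat_natCast, decide_eq_true_eq, ge_iff_le] at hp
  have h1 : num_a ^ n < 0 := hodd.pow_neg h
  have h2 : (0:Int) ≤ (n : Int) ^ num_b.toNat := by positivity
  omega

theorem loop_eq (num_a num_b : Int) (fuel : Nat) (x r : Int) (h1 : x < r) (h2 : r ≤ x + fuel)
    (hP : PI num_a num_b r = true) (hmin : ∀ y, x < y → y < r → ¬ PI num_a num_b y = true) :
    find_the_number_loop num_a num_b fuel x = r := by
  induction fuel generalizing x with
  | zero => omega
  | succ f ih =>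
    show (if pyPow num_a (x+1) ≥ pyPow (x+1) num_b then x+1
          else find_the_number_loop num_a num_b f (x+1)) = r
    by_cases hc : pyPow num_a (x+1) ≥ pyPow (x+1) num_b
    · rw [if_pos hc]
      by_contra hne
      exact hmin (x + 1) (by omega) (by omega) (decide_eq_true hc)
    · rw [if_neg hc]
      have hne : r ≠ x + 1 := fun h => hc (of_decide_eq_true (h ▸ hP))
      exact ih (x + 1) (by omega) (by omega)
        (fun y hy1 hy2 => hmin y (by omega) hy2)

theorem altExp_spec (a num_b : Int) (s : Nat) (fuel : Nat) :
    ∀ e : Nat, 1 ≤ e →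
    (∃ i, i < fuel ∧ altOk a num_b (2 + (s : Int) * ((e * 2 ^ i : Nat) : Int)) = true) →
    ∃ e', 1 ≤ e' ∧ altOk a num_b (2 + (s : Int) * ((e' : Nat) : Int)) = true ∧
      altExp a num_b fuel (2 + (s : Int) * ((e : Nat) : Int)) = 2 + (s : Int) * ((e' : Nat) : Int) := by
  induction fuel with
  | zero =>
    rintro e _ ⟨i, hi, _⟩
    omega
  | succ f ih =>
    rintro e he ⟨i, hi, hok⟩
    by_cases hc : altOk a num_b (2 + (s : Int) * ((e : Nat) : Int)) = true
    · exact ⟨e, he, hc, by rw [altExp, if_pos hc]⟩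
    · have harg : (2 : Int) + ((2 + (s : Int) * ((e : Nat) : Int)) - 2) * 2
          = 2 + (s : Int) * ((e * 2 : Nat) : Int) := by push_cast; ring
      have hstep : altExp a num_b (f + 1) (2 + (s : Int) * ((e : Nat) : Int))
          = altExp a num_b f (2 + (s : Int) * ((e * 2 : Nat) : Int)) := by
        rw [altExp, if_neg (by simpa using hc), harg]
      have hex : ∃ j, j < f ∧ altOk a num_b (2 + (s : Int) * ((e * 2 * 2 ^ j : Nat) : Int)) = true := by
        cases i with
        | zero => exact absurd (by simpa using hok) hc
        | succ j =>
          refine ⟨j, by omega, ?_⟩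
          have : e * 2 * 2 ^ j = e * 2 ^ (j + 1) := by ring
          rw [this]; exact hok
      obtain ⟨e', h1, h2, h3⟩ := ih (e * 2) (by omega) hex
      exact ⟨e', h1, h2, by rw [hstep, h3]⟩

theorem altBin_spec (a num_b : Int) (s : Nat) (hs : 1 ≤ s) (fuel : Nat) :
    ∀ kl kh : Nat, kl < kh →
    altOk a num_b (2 + (s : Int) * ((kl : Nat) : Int)) = false →
    altOk a num_b (2 + (s : Int) * ((kh : Nat) : Int)) = true →
    s * (kh - kl) ≤ fuel →
    ∃ k : Nat, 1 ≤ k ∧ altOk a num_b (2 + (s : Int) * ((k : Nat) : Int)) = true ∧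
      altOk a num_b (2 + (s : Int) * (((k - 1 : Nat) : Nat) : Int)) = false ∧
      altBin a num_b (s : Int) fuel (2 + (s : Int) * ((kl : Nat) : Int)) (2 + (s : Int) * ((kh : Nat) : Int))
        = 2 + (s : Int) * ((k : Nat) : Int) := by
  induction fuel with
  | zero =>
    intro kl kh hlt _ _ hfuel
    have := Nat.mul_pos (by omega : 0 < s) (by omega : 0 < kh - kl)
    omega
  | succ f ih =>
    intro kl kh hlt hfl htr hfuel
    have hdiff : (2 + (s : Int) * ((kh : Nat) : Int)) - (2 + (s : Int) * ((kl : Nat) : Int))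
        = ((s * (kh - kl) : Nat) : Int) := by
      push_cast [Nat.cast_sub hlt.le]; ring
    by_cases hsmall : (2 + (s : Int) * ((kh : Nat) : Int)) - (2 + (s : Int) * ((kl : Nat) : Int)) ≤ (s : Int)
    · have h1 : (s * (kh - kl) : Nat) ≤ s := by exact_mod_cast hdiff ▸ hsmall
      have hk : kh = kl + 1 := by
        by_contra hne
        have h2 : 2 ≤ kh - kl := by omega
        have : s * 2 ≤ s * (kh - kl) := Nat.mul_le_mul_left s h2
        omega
      refine ⟨kh, by omega, htr, ?_, ?_⟩
      · have : kh - 1 = kl := by omega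
        rw [this]; exact hfl
      · rw [altBin, if_pos hsmall]
    · have h1 : (s : Int) < ((s * (kh - kl) : Nat) : Int) := by omega
      have h1' : s < s * (kh - kl) := by exact_mod_cast h1
      have h2 : 2 ≤ kh - kl := by
        by_contra hne
        have : kh - kl ≤ 1 := by omega
        have : s * (kh - kl) ≤ s * 1 := Nat.mul_le_mul_left s this
        omega
      have hd1 : 1 ≤ (kh - kl) / 2 := by omega
      have hd2 : (kh - kl) / 2 < kh - kl := by omega
      have hmid : (2 + (s : Int) * ((kl : Nat) : Int))
            + (PySem.Int.floordiv ((2 + (s : Int) * ((kh : Nat) : Int)) - (2 + (s : Int) * ((kl : Nat) : Int))) (2 * (s : Int))) * (s : Int)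
          = 2 + (s : Int) * (((kl + (kh - kl) / 2 : Nat) : Nat) : Int) := by
        rw [hdiff]
        have h2s : (2 : Int) * (s : Int) = ((2 * s : Nat) : Int) := by push_cast; ring
        rw [h2s, PySem.Int.floordiv_natCast]
        have hdd : s * (kh - kl) / (2 * s) = (kh - kl) / 2 := by
          rw [mul_comm 2 s, Nat.mul_div_mul_left _ _ (by omega : 0 < s)]
        rw [hdd]
        push_cast; ring
      set km : Nat := kl + (kh - kl) / 2 with hkm
      have hfuel2 : ∀ ka kb : Nat, kb - ka + 1 ≤ kh - kl → s * (kb - ka) ≤ f := by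
        intro ka kb hab
        have : s * (kb - ka + 1) ≤ s * (kh - kl) := Nat.mul_le_mul_left s hab
        have : s * (kb - ka) + s = s * (kb - ka + 1) := by ring
        omega
      by_cases hm : altOk a num_b (2 + (s : Int) * ((km : Nat) : Int)) = true
      · obtain ⟨k, hk1, hk2, hk3, hk4⟩ := ih kl km (by omega) hfl hm (hfuel2 kl km (by omega))
        refine ⟨k, hk1, hk2, hk3, ?_⟩
        rw [altBin, if_neg hsmall, hmid]
        show (if altOk a num_b (2 + (s : Int) * ((km : Nat) : Int)) then
            altBin a num_b (s : Int) f (2 + (s : Int) * ((kl : Nat) : Int)) (2 + (s : Int) * ((km : Nat) : Int))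
          else altBin a num_b (s : Int) f (2 + (s : Int) * ((km : Nat) : Int)) (2 + (s : Int) * ((kh : Nat) : Int))) = _
        rw [if_pos hm, hk4]
      · have hm' : altOk a num_b (2 + (s : Int) * ((km : Nat) : Int)) = false := by
          simpa using hm
        obtain ⟨k, hk1, hk2, hk3, hk4⟩ := ih km kh (by omega) hm' htr (hfuel2 km kh (by omega))
        refine ⟨k, hk1, hk2, hk3, ?_⟩
        rw [altBin, if_neg hsmall, hmid]
        show (if altOk a num_b (2 + (s : Int) * ((km : Nat) : Int)) then
            altBin a num_b (s : Int) f (2 + (s : Int) * ((kl : Nat) : Int)) (2 + (s : Int) * ((km : Nat) : Int))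
          else altBin a num_b (s : Int) f (2 + (s : Int) * ((km : Nat) : Int)) (2 + (s : Int) * ((kh : Nat) : Int))) = _
        rw [if_neg (by simpa using hm'), hk4]

theorem main_eq (num_a num_b : Int) (hA1 : 1 ≤ num_a.natAbs)
    (hq : num_b.toNat = 0 ∨ 2 ≤ num_a.natAbs) :
    find_the_number num_a num_b = find_the_number_alt num_a num_b := by
  set A := num_a.natAbs with hA
  set B := num_b.toNat with hB
  set s : Nat := if num_a < 0 then 2 else 1 with hsdef
  have hscases : (0 ≤ num_a ∧ s = 1) ∨ (num_a < 0 ∧ s = 2) := by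
    by_cases h : num_a < 0
    · right; exact ⟨h, by rw [hsdef, if_pos h]⟩
    · left; exact ⟨by omega, by rw [hsdef, if_neg h]⟩
  have hs : 1 ≤ s := by rcases hscases with ⟨_, h⟩ | ⟨_, h⟩ <;> omega
  have hs2 : s ≤ 2 := by rcases hscases with ⟨_, h⟩ | ⟨_, h⟩ <;> omega
  -- bridge: the grid test is QN
  have hok : ∀ k : Nat, (altOk (A : Int) num_b (2 + (s : Int) * ((k : Nat) : Int)) = true)
      ↔ QN A B (2 + s * k) := by
    intro k
    have h1 : (2 + (s : Int) * ((k : Nat) : Int)) = (((2 + s * k : Nat) : Nat) : Int) := by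
      push_cast; ring
    rw [h1, altOk_iff, ← hB]
  -- PI at grid points is QN
  have hPIg : ∀ k : Nat, (PI num_a num_b (((2 + s * k : Nat) : Nat) : Int) = true) ↔ QN A B (2 + s * k) := by
    intro k
    rcases hscases with ⟨hpos, _⟩ | ⟨hneg, hs2'⟩
    · rw [PI_iff_nonneg num_a num_b hpos, ← hA, ← hB]
    · rw [hs2', PI_iff_neg_even num_a num_b hneg _ (by omega), ← hA, ← hB]
  -- the existence point: z = 2 + s * 2 ^ m
  have hzQ : QN A B (2 + s * 2 ^ (2 * B + 8)) := by
    rcases hq with h0 | h2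
    · rw [h0]; exact QN_zero A (by omega) _
    · refine QN_big A B _ h2 ?_ ?_
      · have := Nat.one_le_two_pow (n := 2 * B + 8); nlinarith
      · have h1 : s * 2 ^ (2 * B + 8) ≤ 2 * 2 ^ (2 * B + 8) := Nat.mul_le_mul_right _ hs2
        have h2' : 2 ^ (2 * B + 10) = 4 * 2 ^ (2 * B + 8) := by ring
        have := Nat.one_le_two_pow (n := 2 * B + 8)
        omega
  -- the least solution
  have hex : ∃ j : Nat, PI num_a num_b ((j : Int) + 2) = true := by
    refine ⟨s * 2 ^ (2 * B + 8), ?_⟩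
    have hcast : ((s * 2 ^ (2 * B + 8) : Nat) : Int) + 2 = (((2 + s * 2 ^ (2 * B + 8) : Nat) : Nat) : Int) := by
      push_cast; ring
    rw [hcast, hPIg]; exact hzQ
  set k0 := Nat.find hex with hk0
  have hPIr : PI num_a num_b ((k0 : Int) + 2) = true := Nat.find_spec hex
  have hminr : ∀ j : Nat, j < k0 → ¬ PI num_a num_b ((j : Int) + 2) = true := fun j hj => Nat.find_min hex hj
  have hk0le : k0 ≤ s * 2 ^ (2 * B + 8) := Nat.find_min' hex (by
    have hcast : ((s * 2 ^ (2 * B + 8) : Nat) : Int) + 2 = (((2 + s * 2 ^ (2 * B + 8) : Nat) : Nat) : Int) := by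
      push_cast; ring
    rw [hcast, hPIg]; exact hzQ)
  -- ===== side A =====
  have hAside : find_the_number num_a num_b = (k0 : Int) + 2 := by
    show find_the_number_loop num_a num_b (2 ^ (2 * B + 10)) 1 = (k0 : Int) + 2
    apply loop_eq num_a num_b _ 1 _ (by omega) ?_ hPIr ?_
    · -- r ≤ 1 + fuel
      have h1 : s * 2 ^ (2 * B + 8) ≤ 2 * 2 ^ (2 * B + 8) := Nat.mul_le_mul_right _ hs2
      have h2' : 2 ^ (2 * B + 10) = 4 * 2 ^ (2 * B + 8) := by ring
      have h3 := Nat.one_le_two_pow (n := 2 * B + 8)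
      have h4 : k0 + 2 ≤ 1 + 2 ^ (2 * B + 10) := by omega
      exact_mod_cast h4
    · intro y hy1 hy2 hPIy
      have hyform : y = (((y - 2).toNat : Nat) : Int) + 2 := by omega
      have hlt : (y - 2).toNat < k0 := by omega
      exact hminr _ hlt (hyform ▸ hPIy)
  -- ===== side B =====
  have hBside : find_the_number_alt num_a num_b = (k0 : Int) + 2 := by
    have haI : (if num_a < 0 then -num_a else num_a) = (A : Int) := by
      rw [hA]; split <;> omega
    have hstepI : (if num_a < 0 then (2 : Int) else 1) = (s : Int) := by
      rcases hscases with ⟨hpos, h⟩ | ⟨hneg, h⟩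
      · rw [h, if_neg (by omega)]; norm_num
      · rw [h, if_pos hneg]; norm_num
    show (let a := if num_a < 0 then -num_a else num_a
          let step : Int := if num_a < 0 then 2 else 1
          if altOk a num_b 2 then 2
          else
            let hi := altExp a num_b (2 * num_b.toNat + 9) (2 + step)
            altBin a num_b step (hi - 2).toNat 2 hi) = (k0 : Int) + 2
    simp only [haI, hstepI, ← hB]
    by_cases h2ok : altOk (A : Int) num_b 2 = true
    · rw [if_pos h2ok]
      -- QN at 2, hence k0 = 0
      have h20 : (2 : Int) + (s : Int) * ((0 : Nat) : Int) = 2 := by norm_num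
      have hQ2 : QN A B (2 + s * 0) := (hok 0).mp (by rw [h20]; exact h2ok)
      have hPI2 : PI num_a num_b ((0 : Int) + 2) = true := by
        have h := (hPIg 0).mpr hQ2
        have hc : (((2 + s * 0 : Nat) : Nat) : Int) = (0 : Int) + 2 := by simp
        rw [hc] at h
        exact h
      have : k0 = 0 := by
        by_contra h
        exact hminr 0 (by omega) hPI2
      omega
    · have h2f : altOk (A : Int) num_b 2 = false := by simpa using h2ok
      rw [if_neg (by simp [h2ok])]
      -- no grid point below k can satisfy QN once we know the boundary
      -- exponential search
      have hexE : ∃ i, i < 2 * B + 9 ∧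
          altOk (A : Int) num_b (2 + (s : Int) * ((1 * 2 ^ i : Nat) : Int)) = true := by
        refine ⟨2 * B + 8, by omega, ?_⟩
        rw [one_mul]
        exact (hok (2 ^ (2 * B + 8))).mpr hzQ
      have hinit : (2 : Int) + (s : Int) = 2 + (s : Int) * ((1 : Nat) : Int) := by push_cast; ring
      rw [hinit]
      obtain ⟨e', he1, he2, he3⟩ := altExp_spec (A : Int) num_b s (2 * B + 9) 1 (by omega) hexE
      rw [he3]
      -- binary search
      have hfuel : ((2 + (s : Int) * ((e' : Nat) : Int)) - 2).toNat = s * e' := by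
        have : (2 + (s : Int) * ((e' : Nat) : Int)) - 2 = ((s * e' : Nat) : Int) := by push_cast; ring
        rw [this, Int.toNat_natCast]
      rw [hfuel]
      have h0f : altOk (A : Int) num_b (2 + (s : Int) * ((0 : Nat) : Int)) = false := by
        rw [show (2 : Int) + (s : Int) * ((0 : Nat) : Int) = 2 by norm_num]
        exact h2f
      have hbin := altBin_spec (A : Int) num_b s hs (s * e') 0 e' (by omega) h0f he2
        (by simp)
      obtain ⟨k, hk1, hk2, hk3, hk4⟩ := hbin
      have hbin0 : (2 : Int) + (s : Int) * ((0 : Nat) : Int) = 2 := by push_cast; ring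
      rw [hbin0] at hk4
      rw [hk4]
      -- k0 = s * k
      have hnotg : ∀ j : Nat, j < k → ¬ QN A B (2 + s * j) := by
        intro j hj hQ
        rcases Nat.eq_zero_or_pos j with h0 | hpos
        · rw [h0] at hQ
          exact absurd ((hok 0).mpr hQ) (by simp [h2f])
        · have hmono : QN A B (2 + s * (k - 1)) := by
            apply QN_mono A B (2 + s * j) _ ?_ ?_ hQ
            · have : 1 ≤ s * j := Nat.mul_pos (by omega) hpos
              omega
            · have : s * j ≤ s * (k - 1) := Nat.mul_le_mul_left s (by omega)
              omega
          exact absurd ((hok (k - 1)).mpr hmono) (by simp [hk3])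
      have hQk : QN A B (2 + s * k) := (hok k).mp hk2
      have hPIk : PI num_a num_b (((s * k : Nat) : Int) + 2) = true := by
        have := (hPIg k).mpr hQk
        convert this using 2; push_cast; ring
      have hk0ge : k0 ≤ s * k := Nat.find_min' hex hPIk
      have hk0lt : ¬ k0 < s * k := by
        intro hlt
        rcases hscases with ⟨hpos, hs1⟩ | ⟨hneg, hs2'⟩
        · -- s = 1 : every point is a grid point
          rw [hs1, one_mul] at hlt
          have : PI num_a num_b (((2 + s * k0 : Nat) : Nat) : Int) = true := by
            have hcast : (((2 + s * k0 : Nat) : Nat) : Int) = (k0 : Int) + 2 := by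
              rw [hs1]; push_cast; ring
            rw [hcast]; exact hPIr
          exact hnotg k0 (by omega) ((hPIg k0).mp this)
        · -- s = 2 : odd points never satisfy PI; even points are grid points
          rw [hs2'] at hlt
          rcases Nat.even_or_odd k0 with ⟨j, hj⟩ | ⟨j, hj⟩
          · have : PI num_a num_b (((2 + s * j : Nat) : Nat) : Int) = true := by
              have hcast : (((2 + s * j : Nat) : Nat) : Int) = (k0 : Int) + 2 := by
                rw [hs2']; push_cast; omega
              rw [hcast]; exact hPIr
            exact hnotg j (by omega) ((hPIg j).mp this)
          · have hodd : ¬ 2 ∣ (k0 + 2) := by omega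
            have := PI_not_neg_odd num_a num_b hneg (k0 + 2) hodd
            have hcast : (((k0 + 2 : Nat) : Nat) : Int) = (k0 : Int) + 2 := by push_cast; ring
            rw [hcast] at this
            exact this hPIr
      have hk0eq : k0 = s * k := by omega
      rw [hk0eq]; push_cast; ring
  rw [hAside, hBside]

-- ===== VERDICT (by name: the statement is the Claim_ definition above) =====
theorem find_the_number_spec : Claim_equal_find_the_number := by
  intro num_a num_b _ hpre
  unfold Spec_find_the_number
  rcases hpre with ⟨hb, ha⟩ | ⟨hb, ha⟩
  · exact main_eq num_a num_b (by omega) (Or.inl (by omega))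
  · exact main_eq num_a num_b (by omega) (Or.inr (by omega))
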